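-- pv_equiv track=rewrite | github.com/femiaiyeku/Algorithm_Exprt_Project | Arrays/Minimum_Area_Rectangle/solution_1.py | initializeColumns
-- ===== SOURCE A (Python) =====
-- def initializeColumns(points):
--     columns = {}
--     for point in points:
--         x, y = point
--         if x not in columns:
--             columns[x] = []
--         columns[x].append(y)
--     return columns
-- ===== SOURCE B (Python) =====
-- def initializeColumns(points):
--     # Alternative decomposition: repeatedly partition the remaining points on the
--     # first point's x, emitting one whole column per round (no per-point dict updates).
--     pts = list(points)
--     columns = {}
--     while pts:
--         x0 = pts[0][0]
--         ys = []
--         rest = []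
--         for x, y in pts:
--             if x == x0:
--                 ys.append(y)
--             else:
--                 rest.append((x, y))
--         columns[x0] = ys
--         pts = rest
--     return columns
-- ===== Notes on version B (the rewrite author's own statement) =====
-- stated objective: alternative
-- what changed: Replaces the per-point dict membership-test/append loop by a repeated partition: each round splits the remaining points on the first point's x and emits that whole column at once.
import Mathlib
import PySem

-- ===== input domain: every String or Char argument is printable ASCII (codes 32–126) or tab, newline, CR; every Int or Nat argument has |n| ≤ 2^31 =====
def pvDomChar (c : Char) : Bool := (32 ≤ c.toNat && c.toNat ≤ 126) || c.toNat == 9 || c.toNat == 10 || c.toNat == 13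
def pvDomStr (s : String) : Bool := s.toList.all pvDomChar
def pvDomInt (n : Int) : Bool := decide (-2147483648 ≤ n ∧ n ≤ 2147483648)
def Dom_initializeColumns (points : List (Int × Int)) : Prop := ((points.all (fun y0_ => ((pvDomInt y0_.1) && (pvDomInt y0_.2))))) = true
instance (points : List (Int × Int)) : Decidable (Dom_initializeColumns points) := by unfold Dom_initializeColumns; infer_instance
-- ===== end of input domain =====

-- B replaces A's per-point dict membership-test/append loop by a repeated partition
-- on the first remaining point's x, emitting one whole column per round (objective: alternative).

-- ===== PORT A =====
-- for point in points: x, y = point; if x not in columns: columns[x] = []; columns[x].append(y)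
def initializeColumns (points : List (Int × Int)) : List (Int × List Int) :=
  (points.foldl (fun (columns : PySem.Dict Int (List Int)) point =>
      let columns := if columns.contains point.1 then columns else columns.insert point.1 []
      columns.modify point.1 [] (fun ys => ys ++ [point.2]))
    PySem.Dict.empty).items

-- ===== PORT B =====
-- the inner 'for x, y in pts' partition loop of Source B (ys = matching y's, rs = the rest)
def pvPartB (x0 : Int) : List (Int × Int) → List Int × List (Int × Int)
  | [] => ([], [])
  | (x, y) :: rest =>
    let (ys, rs) := pvPartB x0 rest
    if x == x0 then (y :: ys, rs) else (ys, (x, y) :: rs)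

-- termination fact for the while loop: the non-matching part never grows
theorem pvPartB_snd_len (x0 : Int) (l : List (Int × Int)) :
    (pvPartB x0 l).2.length ≤ l.length := by
  induction l with
  | nil => simp [pvPartB]
  | cons p rest ih =>
    obtain ⟨x, y⟩ := p
    simp only [pvPartB]
    split <;> simp <;> omega

-- the 'while pts' loop of Source B: emit the column of pts[0][0], recurse on the rest
def initializeColumns_alt (points : List (Int × Int)) : List (Int × List Int) :=
  match points with
  | [] => []
  | (x0, y0) :: rest =>
    (x0, (pvPartB x0 ((x0, y0) :: rest)).1) ::
      initializeColumns_alt (pvPartB x0 ((x0, y0) :: rest)).2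
termination_by points.length
decreasing_by
  have h := pvPartB_snd_len x0 rest
  simp [pvPartB]
  omega

-- ===== PRECONDITION & SPEC =====
def Spec_initializeColumns (points : List (Int × Int)) (out : List (Int × List Int)) : Prop := out = initializeColumns_alt points
instance (points : List (Int × Int)) (out : List (Int × List Int)) : Decidable (Spec_initializeColumns points out) := by unfold Spec_initializeColumns; infer_instance

-- ===== CLAIM (what is proved, stated in full; the proofs are below) =====
def Claim_equal_initializeColumns : Prop := ∀ (points : List (Int × Int)), Dom_initializeColumns points → Spec_initializeColumns points (initializeColumns points)

-- ===== LEMMAS AND PROOFS =====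

-- common canonical value both ports are reduced to:
-- distinct x's in first-occurrence order, each paired with its y's in input order
def pvCanon (points : List (Int × Int)) : List (Int × List Int) :=
  (PySem.Set.ofList (points.map (·.1))).map
    (fun k => (k, (points.filter (fun p => p.1 == k)).map (·.2)))

-- ---- A-side ----

theorem pv_get?_append_self (l : List (Int × List Int)) (k : Int) (v : List Int)
    (h : ∀ p ∈ l, p.1 ≠ k) : (PySem.Dict.mk (l ++ [(k, v)])).get? k = some v := by
  induction l with
  | nil => simp [PySem.Dict.get?_mk_cons]
  | cons q rest ih =>
    rw [List.cons_append, PySem.Dict.get?_mk_cons]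
    have := h q (List.mem_cons_self)
    simp [this]
    exact ih (fun p hp => h p (List.mem_cons_of_mem _ hp))

-- inserting [] before the modify is invisible: A's loop body is a plain modify
theorem pv_insert_modify (d : PySem.Dict Int (List Int)) (k : Int) (f : List Int → List Int)
    (h : d.contains k = false) : (d.insert k []).modify k [] f = d.modify k [] f := by
  have hk : ∀ p ∈ d.items, p.1 ≠ k := by
    intro p hp hpk
    have : d.contains k = true := by
      rw [PySem.Dict.contains_iff_mem_keys]
      exact hpk ▸ PySem.Dict.mem_keys_of_mem_items d hp
    simp [this] at h
  have hg : ({ items := d.items ++ [(k, [])] } : PySem.Dict Int (List Int)).getD k [] = [] := by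
    rw [PySem.Dict.getD_eq_get?_getD, pv_get?_append_self _ _ _ hk]
    rfl
  simp [PySem.Dict.modify, PySem.Dict.insert, h, hg]
  constructor
  · rw [List.map_congr_left ?_, List.map_id]
    intro p hp
    simp [hk p hp]
  · rw [PySem.Dict.getD_of_not_contains _ _ h]

theorem A_eq_canon (points : List (Int × Int)) :
    initializeColumns points = pvCanon points := by
  rw [initializeColumns]
  have hf : (fun (columns : PySem.Dict Int (List Int)) point =>
        let columns := if columns.contains point.1 then columns else columns.insert point.1 []
        columns.modify point.1 [] (fun ys => ys ++ [point.2]))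
      = (fun (d : PySem.Dict Int (List Int)) (p : Int × Int) =>
          d.modify p.1 [] (fun ys => ys ++ [p.2])) := by
    funext d p
    by_cases h : d.contains p.1 = true
    · simp [h]
    · simp only [Bool.not_eq_true] at h
      simp only [h, Bool.false_eq_true, if_false]
      exact pv_insert_modify d p.1 _ h
  rw [hf, pvCanon]
  have hnd : (points.foldl (fun d p => d.modify p.1 [] (fun ys => ys ++ [p.2]))
      PySem.Dict.empty).keys.Nodup := by
    apply PySem.Dict.nodup_keys_foldl_modify_key
    simp [PySem.Dict.keys_empty]
  rw [PySem.Dict.items_eq_map_keys _ hnd []]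
  rw [PySem.Dict.keys_foldl_modify_key]
  simp only [PySem.Dict.keys_empty]
  rw [PySem.Set.update_nil_left]
  apply List.map_congr_left
  intro k hk
  rw [PySem.Dict.getD_foldl_modify_append]
  simp [PySem.Dict.getD_empty]

-- ---- B-side ----

theorem pvPartB_fst (x0 : Int) (l : List (Int × Int)) :
    (pvPartB x0 l).1 = (l.filter (fun p => p.1 == x0)).map (·.2) := by
  induction l with
  | nil => simp [pvPartB]
  | cons p rest ih =>
    obtain ⟨x, y⟩ := p
    simp only [pvPartB, List.filter_cons]
    by_cases hx : (x == x0) = true <;> simp [hx, ih]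

theorem pvPartB_snd (x0 : Int) (l : List (Int × Int)) :
    (pvPartB x0 l).2 = l.filter (fun p => !(p.1 == x0)) := by
  induction l with
  | nil => simp [pvPartB]
  | cons p rest ih =>
    obtain ⟨x, y⟩ := p
    simp only [pvPartB, List.filter_cons]
    by_cases hx : (x == x0) = true <;> simp [hx, ih]

theorem pv_ofList_filter (xs : List Int) (p : Int → Bool) :
    PySem.Set.ofList (xs.filter p) = (PySem.Set.ofList xs).filter p := by
  induction xs with
  | nil => simp [PySem.Set.ofList_nil]
  | cons x xs ih =>
    by_cases hx : p x = true
    · simp [hx, PySem.Set.ofList_cons, PySem.Set.discard, ih, List.filter_filter, Bool.and_comm]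
    · simp only [List.filter_cons, hx, Bool.false_eq_true, if_false,
        PySem.Set.ofList_cons, PySem.Set.discard, ih, List.filter_filter]
      apply List.filter_congr
      intro y _
      by_cases hy : y = x
      · subst hy; simp at hx; simp [hx]
      · simp [hy]

theorem pv_discard_ofList_map_fst (x0 : Int) (rest : List (Int × Int)) :
    PySem.Set.discard (PySem.Set.ofList (rest.map (·.1))) x0
      = PySem.Set.ofList ((rest.filter (fun p => !(p.1 == x0))).map (·.1)) := by
  rw [PySem.Set.discard, ← pv_ofList_filter, List.filter_map]
  simp only [Function.comp_def]

theorem alt_eq_canon (points : List (Int × Int)) :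
    initializeColumns_alt points = pvCanon points := by
  induction points using initializeColumns_alt.induct with
  | case1 => simp [initializeColumns_alt, pvCanon, PySem.Set.ofList_nil]
  | case2 x0 y0 rest ih =>
    rw [initializeColumns_alt, ih, pvPartB_fst, pvPartB_snd, pvCanon, pvCanon]
    have hq : List.filter (fun p => !(p.1 == x0)) ((x0, y0) :: rest)
        = rest.filter (fun p => !(p.1 == x0)) := by simp
    rw [hq]
    have hkeys : PySem.Set.ofList (((x0, y0) :: rest).map (·.1))
        = x0 :: PySem.Set.ofList ((rest.filter (fun p => !(p.1 == x0))).map (·.1)) := by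
      rw [List.map_cons, PySem.Set.ofList_cons, ← pv_discard_ofList_map_fst]
    rw [hkeys, List.map_cons]
    congr 1
    apply List.map_congr_left
    intro k hk
    have hkne : k ≠ x0 := by
      intro h
      subst h
      rw [PySem.Set.mem_ofList] at hk
      simp at hk
    have h1 : List.filter (fun p => p.1 == k) ((x0, y0) :: rest)
        = rest.filter (fun p => p.1 == k) := by simp [Ne.symm hkne]
    have h2 : (rest.filter (fun p => !(p.1 == x0))).filter (fun p => p.1 == k)
        = rest.filter (fun p => p.1 == k) := by
      rw [List.filter_filter]
      apply List.filter_congr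
      intro p _
      by_cases hp : p.1 = k <;> simp [hp, hkne]
    rw [h1, h2]

-- ===== VERDICT (by name: the statement is the Claim_ definition above) =====
theorem initializeColumns_spec : Claim_equal_initializeColumns := by
  intro points _
  unfold Spec_initializeColumns
  rw [A_eq_canon, alt_eq_canon]
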